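-- pv_equiv track=rewrite | github.com/TruongPN-dev/bai-dau-tien | lession_01-python-basic/b2.py | in_3_so_chan
-- ===== SOURCE A (Python) =====
-- def in_3_so_chan(tu,den):
--     chuoi = ""
--     dem = 0
--     while tu <= den:
--         if tu % 2 == 0:
--             if tu != den:
--                 chuoi += str(tu) + ", "
--                 dem += 1
--                 if dem == 3:
--                     chuoi += "\n"
--                     dem = 0
--             else:
--                 chuoi += str(tu)
--         tu += 1
--     return chuoi
-- ===== SOURCE B (Python) =====
-- def in_3_so_chan(tu, den):
--     # collect the even numbers once, split off the plain endpoint, then format in chunks of three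
--     start = tu if tu % 2 == 0 else tu + 1
--     evens = list(range(start, den + 1, 2))
--     if evens and evens[-1] == den:
--         endpoint = str(evens.pop())
--     else:
--         endpoint = ""
--     body = ""
--     i = 0
--     while i < len(evens):
--         chunk = evens[i:i + 3]
--         body += "".join(str(x) + ", " for x in chunk)
--         if len(chunk) == 3:
--             body += "\n"
--         i += 3
--     return body + endpoint
-- ===== Notes on version B (the rewrite author's own statement) =====
-- stated objective: simpler
-- what changed: Replaces A's single stateful while-loop (running string + mod-3 counter with endpoint special-cased inside) by a two-phase build: collect the evens once with range(start, den+1, 2), pop the plain endpoint token, then format the rest in chunks of three.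
import Mathlib
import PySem

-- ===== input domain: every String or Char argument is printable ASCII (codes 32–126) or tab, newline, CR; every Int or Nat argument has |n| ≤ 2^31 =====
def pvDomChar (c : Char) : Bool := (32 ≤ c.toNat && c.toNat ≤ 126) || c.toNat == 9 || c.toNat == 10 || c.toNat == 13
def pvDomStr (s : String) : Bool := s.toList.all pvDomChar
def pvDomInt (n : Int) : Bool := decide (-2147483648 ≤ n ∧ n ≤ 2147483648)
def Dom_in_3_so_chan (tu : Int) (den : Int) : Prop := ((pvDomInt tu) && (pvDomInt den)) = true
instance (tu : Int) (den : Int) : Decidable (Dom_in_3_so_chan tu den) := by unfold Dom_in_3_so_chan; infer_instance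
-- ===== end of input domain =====

-- B collects the even numbers once with range(step 2), pops the plain endpoint, and formats the rest
-- in chunks of three (objective: simpler two-phase decomposition instead of a stateful counter loop).

-- ===== PORT A =====
-- literal port of A's while-loop: state (chuoi, dem), stepping tu by 1
def in_3_so_chan_loop (tu den : Int) (chuoi : String) (dem : Int) : String :=
  if _h : tu ≤ den then
    if PySem.Int.mod tu 2 = 0 then
      if tu ≠ den then
        let chuoi' := chuoi ++ (PySem.Int.toStr tu ++ ", ")
        let dem' := dem + 1
        if dem' = 3 then in_3_so_chan_loop (tu + 1) den (chuoi' ++ "\n") 0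
        else in_3_so_chan_loop (tu + 1) den chuoi' dem'
      else in_3_so_chan_loop (tu + 1) den (chuoi ++ PySem.Int.toStr tu) dem
    else in_3_so_chan_loop (tu + 1) den chuoi dem
  else chuoi
termination_by (den + 1 - tu).toNat
decreasing_by all_goals omega

def in_3_so_chan (tu : Int) (den : Int) : String :=
  in_3_so_chan_loop tu den "" 0

-- ===== PORT B =====
-- "".join(str(x) + ", " for x in chunk)
def pvFmtChunk (chunk : List Int) : String :=
  String.join (chunk.map (fun x => PySem.Int.toStr x ++ ", "))

-- the while-loop over the evens, an index i stepping by 3, accumulating body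
def pvChunkLoop (evens : List Int) (i : Int) (body : String) : String :=
  if _h : i < (evens.length : Int) then
    let chunk := PySem.List.slice evens (some i) (some (i + 3))
    let body' := body ++ pvFmtChunk chunk
    let body'' := if chunk.length = 3 then body' ++ "\n" else body'
    pvChunkLoop evens (i + 3) body''
  else body
termination_by ((evens.length : Int) - i).toNat
decreasing_by omega

def in_3_so_chan_alt (tu : Int) (den : Int) : String :=
  let start := if PySem.Int.mod tu 2 = 0 then tu else tu + 1
  let evens := PySem.List.pyRange start (den + 1) 2
  if evens ≠ [] ∧ PySem.List.pyGet? evens (-1) = some den then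
    pvChunkLoop evens.dropLast 0 "" ++ PySem.Int.toStr den
  else
    pvChunkLoop evens 0 ""

-- ===== PRECONDITION & SPEC =====
def Spec_in_3_so_chan (tu : Int) (den : Int) (out : String) : Prop := out = in_3_so_chan_alt tu den
instance (tu : Int) (den : Int) (out : String) : Decidable (Spec_in_3_so_chan tu den out) := by unfold Spec_in_3_so_chan; infer_instance

-- ===== CLAIM (what is proved, stated in full; the proofs are below) =====
def Claim_equal_in_3_so_chan : Prop := ∀ (tu : Int) (den : Int), Dom_in_3_so_chan tu den → Spec_in_3_so_chan tu den (in_3_so_chan tu den)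

-- ===== LEMMAS AND PROOFS =====

-- the even numbers in [tu, d), ascending
def pvBody (tu d : Int) : List Int :=
  if _h : tu < d then
    if tu % 2 = 0 then tu :: pvBody (tu + 1) d else pvBody (tu + 1) d
  else []
termination_by (d - tu).toNat
decreasing_by all_goals omega

-- the formatted body, starting from counter value dem
def pvFmt (xs : List Int) (dem : Int) : String :=
  match xs with
  | [] => ""
  | x :: xs' =>
      PySem.Int.toStr x ++ ", " ++
        (if dem + 1 = 3 then "\n" ++ pvFmt xs' 0 else pvFmt xs' (dem + 1))

-- the lone endpoint token
def pvEndpt (tu den : Int) : String :=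
  if tu ≤ den ∧ den % 2 = 0 then PySem.Int.toStr den else ""

theorem pvBody_nil {tu d : Int} (h : ¬ tu < d) : pvBody tu d = [] := by
  unfold pvBody; simp [h]

theorem pvBody_mem {tu d x : Int} (hx : x ∈ pvBody tu d) :
    tu ≤ x ∧ x < d ∧ x % 2 = 0 := by
  by_cases h : tu < d
  · unfold pvBody at hx
    simp only [h, dif_pos] at hx
    by_cases he : tu % 2 = 0
    · simp [he] at hx
      rcases hx with rfl | hx
      · exact ⟨le_refl _, h, he⟩
      · have := pvBody_mem hx; omega
    · simp [he] at hx
      have := pvBody_mem hx; omega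
  · rw [pvBody_nil h] at hx; simp at hx
termination_by (d - tu).toNat
decreasing_by all_goals omega

-- A's loop produces the formatted body followed by the endpoint
theorem loop_eq (tu den : Int) (chuoi : String) (dem : Int) :
    in_3_so_chan_loop tu den chuoi dem =
      chuoi ++ (pvFmt (pvBody tu den) dem ++ pvEndpt tu den) := by
  by_cases h : tu ≤ den
  · rw [in_3_so_chan_loop]
    have hm : PySem.Int.mod tu 2 = tu % 2 := PySem.Int.mod_eq_emod_of_pos (by norm_num)
    by_cases he : tu % 2 = 0
    · by_cases hne : tu ≠ den
      · have hlt : tu < den := lt_of_le_of_ne h hne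
        have hb : pvBody tu den = tu :: pvBody (tu + 1) den := by
          rw [pvBody, dif_pos hlt, if_pos he]
        have hend : pvEndpt (tu + 1) den = pvEndpt tu den := by
          unfold pvEndpt; have : tu + 1 ≤ den := by omega
          simp [this, h]
        by_cases h3 : dem + 1 = 3
        · simp only [h, hm, he, hne, h3, dif_pos, if_pos, if_true, ne_eq,
            not_false_eq_true]
          rw [loop_eq (tu + 1) den _ 0, hb, hend]
          simp only [pvFmt, h3, if_pos, String.append_assoc]
        · simp only [h, hm, he, hne, h3, dif_pos, if_pos, if_false, ite_false, ne_eq,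
            not_false_eq_true, if_true]
          rw [loop_eq (tu + 1) den _ (dem + 1), hb, hend]
          simp [pvFmt, h3, String.append_assoc]
      · rw [not_not] at hne
        subst hne
        have hb : pvBody tu tu = [] := pvBody_nil (by omega)
        simp only [hm, he, dif_pos, if_pos, le_refl, ne_eq, not_true_eq_false, ite_false,
          if_true, if_false]
        rw [loop_eq (tu + 1) tu _ dem, pvBody_nil (show ¬ tu + 1 < tu by omega)]
        simp [pvFmt, pvEndpt, he, pvBody_nil, hb]
    · have hb : pvBody tu den = pvBody (tu + 1) den := by
        by_cases hlt : tu < den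
        · rw [pvBody, dif_pos hlt, if_neg he]
        · rw [pvBody_nil hlt, pvBody_nil (by omega)]
      have hend : pvEndpt (tu + 1) den = pvEndpt tu den := by
        unfold pvEndpt
        by_cases hde : den % 2 = 0
        · have hne : tu ≠ den := by omega
          have : tu + 1 ≤ den ↔ tu ≤ den := by omega
          simp [hde, this]
        · simp [hde]
      simp only [h, hm, he, dif_pos, if_false, ite_false]
      rw [loop_eq (tu + 1) den chuoi dem, hb, hend]
  · rw [in_3_so_chan_loop]
    simp only [h, dif_neg, not_false_eq_true]
    rw [pvBody_nil (by omega)]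
    have : pvEndpt tu den = "" := by unfold pvEndpt; simp [h]
    simp [pvFmt, this]
termination_by (den + 1 - tu).toNat
decreasing_by all_goals omega

-- one chunk of three peels off the front of the formatted body
theorem pvFmt_step (xs : List Int) (hx : xs ≠ []) :
    pvFmt xs 0 = pvFmtChunk (xs.take 3) ++
      ((if (xs.take 3).length = 3 then "\n" else "") ++ pvFmt (xs.drop 3) 0) := by
  match xs with
  | [a] => simp [pvFmtChunk, pvFmt, String.join, String.append_assoc]
  | [a, b] => simp [pvFmtChunk, pvFmt, String.join, String.append_assoc]
  | a :: b :: c :: t =>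
      simp [pvFmtChunk, pvFmt, String.join, String.append_assoc]

-- B's chunk loop produces the same formatted body (counter starting at 0)
theorem chunkLoop_eq (evens : List Int) (i : Int) (body : String) (hi : 0 ≤ i) :
    pvChunkLoop evens i body = body ++ pvFmt (evens.drop i.toNat) 0 := by
  by_cases h : i < (evens.length : Int)
  · rw [pvChunkLoop]
    simp only [h, dif_pos]
    have hslice : PySem.List.slice evens (some i) (some (i + 3)) =
        (evens.drop i.toNat).take 3 := by
      have h1 : i = ((i.toNat : Nat) : Int) := by omega
      rw [h1, show ((i.toNat : Nat) : Int) + 3 = ((i.toNat : Nat) : Int) + ((3 : Nat) : Int)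
        from by norm_num, PySem.List.slice_natCast_add]
      simp
      rw [show (max i 0).toNat = i.toNat from by omega]
    have hdrop : evens.drop (i + 3).toNat = (evens.drop i.toNat).drop 3 := by
      rw [List.drop_drop]; congr 1; omega
    rw [chunkLoop_eq evens (i + 3) _ (by omega), hdrop, hslice]
    have hne : evens.drop i.toNat ≠ [] := by
      have : (evens.drop i.toNat).length = evens.length - i.toNat := List.length_drop
      intro hc
      rw [hc] at this
      simp at this
      omega
    rw [pvFmt_step _ hne]
    split_ifs <;> simp [String.append_assoc]
  · rw [pvChunkLoop]
    simp only [h, dif_neg, not_false_eq_true]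
    rw [List.drop_eq_nil_of_le (by omega)]
    simp [pvFmt]
termination_by ((evens.length : Int) - i).toNat
decreasing_by omega

-- range(start, d, 2) lists exactly the evens of [tu, d) when start is tu rounded up to even
theorem pyRange_two_nil {a b : Int} (h : b ≤ a) : PySem.List.pyRange a b 2 = [] := by
  rw [PySem.List.pyRange_of_pos _ _ (by norm_num)]
  have : ¬ a < b := by omega
  simp [this]

theorem pyRange_two_cons {a b : Int} (h : a < b) :
    PySem.List.pyRange a b 2 = a :: PySem.List.pyRange (a + 2) b 2 := by
  rw [PySem.List.pyRange_of_pos _ _ (by norm_num),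
      PySem.List.pyRange_of_pos _ _ (by norm_num)]
  by_cases h2 : a + 2 < b
  · have hn : ((b - a + 2 - 1) / 2).toNat = ((b - (a + 2) + 2 - 1) / 2).toNat + 1 := by
      omega
    simp only [h, h2, if_pos, hn, List.range_succ_eq_map, List.map_cons, List.map_map]
    congr 1
    · norm_num
    · apply List.map_congr_left
      intro k _
      simp only [Function.comp_apply, Nat.succ_eq_add_one]
      push_cast; ring
  · have hn : ((b - a + 2 - 1) / 2).toNat = 1 := by omega
    simp [h, h2, hn, List.range_succ]

theorem pyRange_evens (tu d : Int) :
    PySem.List.pyRange (if tu % 2 = 0 then tu else tu + 1) d 2 = pvBody tu d := by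
  by_cases h : tu < d
  · by_cases he : tu % 2 = 0
    · rw [if_pos he, pyRange_two_cons h]
      have h1 : ¬ (tu + 1) % 2 = 0 := by omega
      have := pyRange_evens (tu + 1) d
      rw [if_neg h1] at this
      unfold pvBody
      simp only [h, he, dif_pos, if_pos]
      rw [show tu + 1 + 1 = tu + 2 from by ring] at this
      rw [this]
    · rw [if_neg he]
      have h1 : (tu + 1) % 2 = 0 := by omega
      have := pyRange_evens (tu + 1) d
      rw [if_pos h1] at this
      unfold pvBody
      simp only [h, he, dif_pos, if_false, ite_false]
      exact this
  · rw [pvBody_nil h, pyRange_two_nil (by split <;> omega)]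
termination_by (d - tu).toNat
decreasing_by all_goals omega

-- splitting off the endpoint
theorem pvBody_succ_even (tu den : Int) (hd : den % 2 = 0) (h : tu ≤ den) :
    pvBody tu (den + 1) = pvBody tu den ++ [den] := by
  by_cases he : tu = den
  · subst he
    rw [pvBody_nil (show ¬ tu < tu by omega)]
    unfold pvBody
    simp [show tu < tu + 1 by omega, hd,
      pvBody_nil (show ¬ tu + 1 < tu + 1 by omega)]
  · have hlt : tu < den := by omega
    have ih := pvBody_succ_even (tu + 1) den hd (by omega)
    by_cases hx : tu % 2 = 0
    · unfold pvBody
      simp only [show tu < den + 1 by omega, hlt, hx, dif_pos, if_pos]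
      rw [ih]; simp
    · unfold pvBody
      simp only [show tu < den + 1 by omega, hlt, hx, dif_pos, if_false, ite_false]
      exact ih
termination_by (den - tu).toNat
decreasing_by all_goals omega

theorem pvBody_succ_odd (tu den : Int) (hd : ¬ den % 2 = 0) :
    pvBody tu (den + 1) = pvBody tu den := by
  by_cases h : tu < den + 1
  · by_cases hlt : tu < den
    · have ih := pvBody_succ_odd (tu + 1) den hd
      unfold pvBody
      by_cases hx : tu % 2 = 0 <;>
        simp only [h, hlt, hx, dif_pos, if_pos, if_false, ite_false] <;> rw [ih]
    · have he : tu = den := by omega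
      subst he
      rw [pvBody_nil (show ¬ tu < tu by omega)]
      unfold pvBody
      simp [h, hd, pvBody_nil (show ¬ tu + 1 < tu + 1 by omega)]
  · rw [pvBody_nil h, pvBody_nil (by omega)]
termination_by (den + 1 - tu).toNat
decreasing_by all_goals omega

theorem pyGet_neg_one {xs : List Int} (h : xs ≠ []) :
    PySem.List.pyGet? xs (-1) = xs.getLast? := by
  have hl : xs.length ≠ 0 := fun hh => h (List.eq_nil_of_length_eq_zero hh)
  simp only [PySem.List.pyGet?, PySem.List.pyIdx?]
  have h1 : ¬ (0 : Int) ≤ -1 := by norm_num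
  have h2 : -(xs.length : Int) ≤ -1 := by omega
  rw [if_neg h1, if_pos h2]
  show xs[xs.length - (-(-1 : Int)).toNat]? = xs.getLast?
  rw [List.getLast?_eq_getElem?]
  congr 1

-- ===== VERDICT (by name: the statement is the Claim_ definition above) =====
theorem in_3_so_chan_spec : Claim_equal_in_3_so_chan := by
  unfold Claim_equal_in_3_so_chan
  intro tu den _
  unfold Spec_in_3_so_chan
  show in_3_so_chan tu den = in_3_so_chan_alt tu den
  unfold in_3_so_chan in_3_so_chan_alt
  rw [loop_eq]
  have hm : PySem.Int.mod tu 2 = tu % 2 := PySem.Int.mod_eq_emod_of_pos (by norm_num)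
  simp only [hm]
  rw [pyRange_evens tu (den + 1)]
  by_cases hd : den % 2 = 0
  · by_cases h : tu ≤ den
    · have hb := pvBody_succ_even tu den hd h
      have hne : pvBody tu (den + 1) ≠ [] := by rw [hb]; simp
      have hlast : (pvBody tu (den + 1)).getLast? = some den := by
        rw [hb, List.getLast?_append]; simp
      rw [if_pos ⟨hne, by rw [pyGet_neg_one hne, hlast]⟩]
      rw [hb, List.dropLast_concat, chunkLoop_eq _ 0 "" (le_refl 0)]
      unfold pvEndpt
      simp [h, hd]
    · have hb : pvBody tu (den + 1) = [] := pvBody_nil (by omega)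
      rw [if_neg (by rw [hb]; simp)]
      rw [hb, chunkLoop_eq _ 0 "" (le_refl 0), pvBody_nil (show ¬ tu < den from by omega)]
      unfold pvEndpt
      simp [h, pvFmt]
  · have hb := pvBody_succ_odd tu den hd
    have hguard : ¬ (pvBody tu (den + 1) ≠ [] ∧
        PySem.List.pyGet? (pvBody tu (den + 1)) (-1) = some den) := by
      rintro ⟨hne, hget⟩
      rw [pyGet_neg_one hne] at hget
      have hmem : den ∈ pvBody tu (den + 1) := List.mem_of_getLast? hget
      have := pvBody_mem hmem
      omega
    rw [if_neg hguard, hb, chunkLoop_eq _ 0 "" (le_refl 0)]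
    unfold pvEndpt
    simp [hd]
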